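-- pv_equiv track=rewrite | github.com/yashitanamdeo/geeks-for-geeks | medium/remove_the_balls/solution.py | finLength
-- ===== SOURCE A (Python) =====
-- from typing import List
--
-- def finLength(N: int, color: List[int], radius: List[int]) -> int:
--     stk = [[color[0], radius[0]]]
--     for i in range(1, N):
--         if len(stk) > 0:
--             if stk[-1][0] == color[i] and stk[-1][1] == radius[i]:
--                 stk.pop()
--             else:
--                 stk.append([color[i], radius[i]])
--         else:
--             stk.append([color[i], radius[i]])
--     return len(stk)
-- ===== SOURCE B (Python) =====
-- from typing import List
--
-- def finLength(N: int, color: List[int], radius: List[int]) -> int: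
--     # ball 0 always enters (matching the problem's stack seed), then balls 1..N-1
--     pairs = [(color[0], radius[0])] + [(color[i], radius[i]) for i in range(1, N)]
--     while True:
--         for i in range(len(pairs) - 1):
--             if pairs[i] == pairs[i + 1]:
--                 del pairs[i:i + 2]
--                 break
--         else:
--             return len(pairs)
-- ===== Notes on version B (the rewrite author's own statement) =====
-- stated objective: alternative
-- what changed: Replaced the single left-to-right stack pass with a repeat-until-stable rewriting loop: build the list of (color,radius) pairs, then repeatedly delete the first adjacent equal pair and rescan until none remains; equality of the final count rests on confluence of the adjacent-pair cancellation system.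
import Mathlib
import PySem

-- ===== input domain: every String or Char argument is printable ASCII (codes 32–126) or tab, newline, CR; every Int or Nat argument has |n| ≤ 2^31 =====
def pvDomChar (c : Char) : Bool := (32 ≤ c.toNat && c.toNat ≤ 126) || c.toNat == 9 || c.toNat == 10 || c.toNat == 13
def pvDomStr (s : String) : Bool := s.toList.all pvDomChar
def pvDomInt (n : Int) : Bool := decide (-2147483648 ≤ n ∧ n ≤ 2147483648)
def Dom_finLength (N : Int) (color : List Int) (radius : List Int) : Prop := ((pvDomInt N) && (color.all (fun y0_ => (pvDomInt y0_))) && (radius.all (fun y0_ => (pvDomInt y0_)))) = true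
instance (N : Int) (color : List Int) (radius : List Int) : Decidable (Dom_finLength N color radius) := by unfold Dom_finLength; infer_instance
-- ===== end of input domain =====

-- B replaces A's single stack pass by a repeat-until-stable deletion of the first
-- adjacent equal (color,radius) pair (alternative decomposition, same results).

-- ===== PORT A =====
-- one loop step of A: stack with top at the head (stk[-1] = head, append = cons, pop = tail)
def pvStepA (stk : List (Int × Int)) (p : Int × Int) : List (Int × Int) :=
  if stk.length > 0 then
    if (stk.headD (0, 0)).1 == p.1 && (stk.headD (0, 0)).2 == p.2 then
      stk.tail
    else
      p :: stk
  else
    p :: stk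

def finLength (N : Int) (color : List Int) (radius : List Int) : Int :=
  let stk : List (Int × Int) :=
    [(((PySem.List.pyGet? color 0).getD 0), ((PySem.List.pyGet? radius 0).getD 0))]
  let stk :=
    (PySem.List.pyRange 1 N 1).foldl
      (fun stk i =>
        pvStepA stk (((PySem.List.pyGet? color i).getD 0), ((PySem.List.pyGet? radius i).getD 0)))
      stk
  (stk.length : Int)

-- ===== PORT B =====
-- the inner for-loop of B: find the first adjacent equal pair, delete both (none = full pass found nothing)
def pvFindDel : List (Int × Int) → Option (List (Int × Int))
  | a :: b :: rest => if a == b then some rest else (pvFindDel (b :: rest)).map (a :: ·)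
  | _ => none

-- the outer while-loop of B; fuel (an upper bound on the iteration count) only makes
-- the recursion structural — each deletion shortens the list by 2, so xs.length fuel suffices
def pvReduceF : Nat → List (Int × Int) → List (Int × Int)
  | 0, xs => xs
  | f + 1, xs =>
    match pvFindDel xs with
    | none => xs
    | some ys => pvReduceF f ys

def pvReduce (xs : List (Int × Int)) : List (Int × Int) := pvReduceF xs.length xs

def finLength_alt (N : Int) (color : List Int) (radius : List Int) : Int :=
  let pairs :=
    (((PySem.List.pyGet? color 0).getD 0), ((PySem.List.pyGet? radius 0).getD 0)) ::
      (PySem.List.pyRange 1 N 1).map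
        (fun i => (((PySem.List.pyGet? color i).getD 0), ((PySem.List.pyGet? radius i).getD 0)))
  ((pvReduce pairs).length : Int)

-- ===== PRECONDITION & SPEC =====
-- Exactly the inputs where the Python A returns: color[0]/radius[0] must exist and
-- every accessed index 1..N-1 must be in range of both lists.
def Pre_finLength (N : Int) (color : List Int) (radius : List Int) : Prop :=
  color ≠ [] ∧ radius ≠ [] ∧ N ≤ (color.length : Int) ∧ N ≤ (radius.length : Int)
instance (N : Int) (color : List Int) (radius : List Int) : Decidable (Pre_finLength N color radius) := by unfold Pre_finLength; infer_instance
def pvWitness_finLength : Int × List Int × List Int := (4, [1, 1, 2, 2], [3, 3, 5, 5])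

def Spec_finLength (N : Int) (color : List Int) (radius : List Int) (out : Int) : Prop := out = finLength_alt N color radius
instance (N : Int) (color : List Int) (radius : List Int) (out : Int) : Decidable (Spec_finLength N color radius out) := by unfold Spec_finLength; infer_instance

-- ===== CLAIM (what is proved, stated in full; the proofs are below) =====
def Claim_equal_finLength : Prop := ∀ (N : Int) (color : List Int) (radius : List Int), Dom_finLength N color radius → Pre_finLength N color radius → Spec_finLength N color radius (finLength N color radius)

-- ===== LEMMAS AND PROOFS =====

-- "no two adjacent equal entries" (invariant of A's stack; what pvFindDel = none certifies)
def pvNoAdj : List (Int × Int) → Prop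
  | a :: b :: t => a ≠ b ∧ pvNoAdj (b :: t)
  | _ => True

theorem pvNoAdj_cons {a : Int × Int} {s : List (Int × Int)} :
    pvNoAdj (a :: s) ↔ (∀ b ∈ s.head?, a ≠ b) ∧ pvNoAdj s := by
  cases s <;> simp [pvNoAdj]

theorem pvPairBeq (p q : Int × Int) : ((q.1 == p.1 && q.2 == p.2) = true) ↔ q = p := by
  cases p; cases q; simp [Prod.ext_iff]

theorem pvStepA_cons {s : List (Int × Int)} {p : Int × Int}
    (h : ∀ b ∈ s.head?, p ≠ b) : pvStepA s p = p :: s := by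
  match s with
  | [] => simp [pvStepA]
  | q :: t =>
    have hb : ¬((q.1 == p.1 && q.2 == p.2) = true) := by
      rw [pvPairBeq]; intro hqp; exact (h q (by simp)) hqp.symm
    simp [pvStepA, hb]

theorem pvStepA_noAdj {s : List (Int × Int)} (h : pvNoAdj s) (p : Int × Int) :
    pvNoAdj (pvStepA s p) := by
  match s with
  | [] => simp [pvStepA, pvNoAdj]
  | q :: t =>
    simp only [pvStepA, List.length_cons, List.headD_cons, gt_iff_lt, Nat.succ_pos, if_true]
    split
    · exact (pvNoAdj_cons.mp h).2
    · rename_i hb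
      rw [pvNoAdj_cons]
      refine ⟨?_, h⟩
      intro b hb'
      simp only [List.head?_cons, Option.mem_def, Option.some.injEq] at hb'
      subst hb'
      intro hpq; exact hb ((pvPairBeq p q).mpr hpq.symm ▸ by simp [hpq.symm])

theorem pvStepA_twice {s : List (Int × Int)} (h : pvNoAdj s) (p : Int × Int) :
    pvStepA (pvStepA s p) p = s := by
  match s with
  | [] => simp [pvStepA]
  | q :: t =>
    by_cases hqp : q = p
    · subst hqp
      have : ((q.1 == q.1 && q.2 == q.2) = true) := by simp
      simp only [pvStepA, List.length_cons, List.headD_cons, this, gt_iff_lt, Nat.succ_pos,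
        if_true, List.tail_cons]
      exact pvStepA_cons (by
        intro b hb hqb
        exact ((pvNoAdj_cons.mp h).1 b hb) hqb)
    · have hb : ¬((q.1 == p.1 && q.2 == p.2) = true) := by rw [pvPairBeq]; exact hqp
      have h1 : pvStepA (q :: t) p = p :: q :: t := by simp [pvStepA, hb]
      have hb2 : ((p.1 == p.1 && p.2 == p.2) = true) := by simp
      rw [h1]; simp [pvStepA]

-- deleting an adjacent equal pair anywhere does not change the stack result
theorem pvStepA_foldl_del {u v : List (Int × Int)} {p : Int × Int} {s : List (Int × Int)}
    (h : pvNoAdj s) :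
    (u ++ p :: p :: v).foldl pvStepA s = (u ++ v).foldl pvStepA s := by
  induction u generalizing s with
  | nil =>
    simp only [List.nil_append, List.foldl_cons]
    rw [pvStepA_twice h]
  | cons a t ih =>
    simp only [List.cons_append, List.foldl_cons]
    exact ih (pvStepA_noAdj h a)

theorem pvFindDel_length {xs ys : List (Int × Int)} (h : pvFindDel xs = some ys) :
    ys.length + 2 = xs.length := by
  induction xs generalizing ys with
  | nil => simp [pvFindDel] at h
  | cons a t ih =>
    match t with
    | [] => simp [pvFindDel] at h
    | b :: rest =>
      by_cases hab : a = b
      · subst hab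
        simp only [pvFindDel, BEq.rfl, if_true] at h
        cases h
        simp
      · have hb : ¬((a == b) = true) := by simpa using hab
        simp only [pvFindDel, if_neg hb, Option.map_eq_some_iff] at h
        obtain ⟨zs, hz, rfl⟩ := h
        have := ih hz
        simp only [List.length_cons] at *
        omega

theorem pvFindDel_some {xs ys : List (Int × Int)} (h : pvFindDel xs = some ys) :
    ∃ u p v, xs = u ++ p :: p :: v ∧ ys = u ++ v := by
  induction xs generalizing ys with
  | nil => simp [pvFindDel] at h
  | cons a t ih =>
    match t with
    | [] => simp [pvFindDel] at h
    | b :: rest =>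
      by_cases hab : a = b
      · subst hab
        simp only [pvFindDel, BEq.rfl, if_true] at h
        have hr : rest = ys := by simpa using h
        subst hr
        exact ⟨[], a, _, rfl, by simp⟩
      · have hb : ¬((a == b) = true) := by simpa using hab
        simp only [pvFindDel, if_neg hb, Option.map_eq_some_iff] at h
        obtain ⟨zs, hz, rfl⟩ := h
        obtain ⟨u, p, v, h1, h2⟩ := ih hz
        exact ⟨a :: u, p, v, by simp [h1], by simp [h2]⟩

theorem pvFindDel_none {xs : List (Int × Int)} (h : pvFindDel xs = none) :
    pvNoAdj xs := by
  induction xs with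
  | nil => simp [pvNoAdj]
  | cons a t ih =>
    match t with
    | [] => simp [pvNoAdj]
    | b :: rest =>
      by_cases hab : a = b
      · simp [pvFindDel, hab] at h
      · have hb : ¬((a == b) = true) := by simpa using hab
        simp only [pvFindDel, if_neg hb, Option.map_eq_none_iff] at h
        exact ⟨hab, ih h⟩

-- an irreducible word is its own stack result (reversed), from a compatible stack
theorem pvStepA_foldl_irred {xs s : List (Int × Int)}
    (hs : pvNoAdj s) (hx : pvNoAdj xs)
    (hjoin : ∀ a ∈ xs.head?, ∀ b ∈ s.head?, a ≠ b) :
    xs.foldl pvStepA s = xs.reverse ++ s := by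
  induction xs generalizing s with
  | nil => simp
  | cons a t ih =>
    have hstep : pvStepA s a = a :: s := pvStepA_cons (fun b hb => hjoin a (by simp) b hb)
    simp only [List.foldl_cons, hstep]
    have hx' := pvNoAdj_cons.mp hx
    rw [ih (s := a :: s) (pvNoAdj_cons.mpr ⟨fun b hb => hjoin a (by simp) b hb, hs⟩) hx'.2 ?_]
    · simp
    · intro x hx0 b hb
      simp only [List.head?_cons, Option.mem_def, Option.some.injEq] at hb
      subst hb
      intro hxa
      exact (hx'.1 x hx0) hxa.symm

-- main invariance: the stack result of any word equals the reverse of its normal form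
theorem pvReduceF_foldl : ∀ (f : Nat) (xs : List (Int × Int)), xs.length ≤ f →
    xs.foldl pvStepA [] = (pvReduceF f xs).reverse := by
  intro f
  induction f with
  | zero =>
    intro xs h
    have hnil : xs = [] := List.eq_nil_of_length_eq_zero (Nat.le_zero.mp h)
    subst hnil
    simp [pvReduceF]
  | succ f ih =>
    intro xs hlen
    unfold pvReduceF
    split
    · rename_i h
      rw [pvStepA_foldl_irred (by simp [pvNoAdj]) (pvFindDel_none h) (by simp)]
      simp
    · rename_i ys h
      obtain ⟨u, p, v, h1, h2⟩ := pvFindDel_some h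
      have hl := pvFindDel_length h
      rw [h1, pvStepA_foldl_del (by simp [pvNoAdj]), ← h2]
      exact ih ys (by omega)

theorem pvReduce_foldl (xs : List (Int × Int)) :
    xs.foldl pvStepA [] = (pvReduce xs).reverse :=
  pvReduceF_foldl xs.length xs le_rfl

-- ===== VERDICT (by name: the statement is the Claim_ definition above) =====
theorem finLength_spec : Claim_equal_finLength := by
  intro N color radius _hdom _hpre
  unfold Spec_finLength finLength finLength_alt
  dsimp only
  set p0 : Int × Int := (((PySem.List.pyGet? color 0).getD 0), ((PySem.List.pyGet? radius 0).getD 0)) with hp0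
  set rest : List (Int × Int) :=
    (PySem.List.pyRange 1 N 1).map
      (fun i => (((PySem.List.pyGet? color i).getD 0), ((PySem.List.pyGet? radius i).getD 0))) with hrest
  have hfold : (PySem.List.pyRange 1 N 1).foldl
      (fun stk i => pvStepA stk (((PySem.List.pyGet? color i).getD 0), ((PySem.List.pyGet? radius i).getD 0))) [p0]
      = rest.foldl pvStepA [p0] := by
    rw [hrest, List.foldl_map]
  have hstart : pvStepA [] p0 = [p0] := by simp [pvStepA]
  have hsplit : (p0 :: rest).foldl pvStepA [] = rest.foldl pvStepA [p0] := by
    simp [List.foldl_cons, hstart]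
  rw [hfold, ← hsplit, pvReduce_foldl]
  simp
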